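-- pv_equiv track=rewrite | github.com/GalacticApricot/TXTBLIT | txtblit.py | _blank
-- ===== SOURCE A (Python) =====
-- def _blank(width, height):
--   list = []
--   d =  ''
--   for i in range(height):
--     d = ''
--     for i in range(width):
--       d = d + ' '
--     list.append(d)
--   return list
-- ===== SOURCE B (Python) =====
-- def _blank(width, height):
--   return [' ' * width for _ in range(height)]
-- ===== Notes on version B (the rewrite author's own statement) =====
-- stated objective: simpler
-- what changed: Replaces the nested loops (inner per-character concatenation, outer append) with a one-line comprehension whose row is the closed form ' ' * width.
import Mathlib
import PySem

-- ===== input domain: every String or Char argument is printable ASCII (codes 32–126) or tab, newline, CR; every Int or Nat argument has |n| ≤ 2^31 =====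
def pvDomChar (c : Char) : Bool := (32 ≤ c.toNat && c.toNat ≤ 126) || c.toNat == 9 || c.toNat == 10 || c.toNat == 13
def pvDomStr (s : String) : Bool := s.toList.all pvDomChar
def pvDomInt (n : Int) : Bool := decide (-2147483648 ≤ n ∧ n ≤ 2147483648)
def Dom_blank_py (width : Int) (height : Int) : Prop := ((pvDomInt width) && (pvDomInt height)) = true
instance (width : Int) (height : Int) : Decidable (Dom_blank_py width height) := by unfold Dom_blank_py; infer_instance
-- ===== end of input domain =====

-- ===== PORT A =====
-- B is the closed form (string multiplication + list repetition); A's nested loops are ported literally.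
-- Python str is built as List Char (exact: only the space character is involved) and packed with String.ofList.
def blank_py (width : Int) (height : Int) : List String :=
  (List.range height.toNat).foldl
    (fun lst _ =>
      lst ++ [String.ofList ((List.range width.toNat).foldl (fun d _ => d ++ [' ']) [])])
    []

-- ===== PORT B =====
def blank_py_alt (width : Int) (height : Int) : List String :=
  (List.range height.toNat).map (fun _ => String.ofList (List.replicate width.toNat ' '))

-- ===== PRECONDITION & SPEC =====
def Spec_blank_py (width : Int) (height : Int) (out : List String) : Prop := out = blank_py_alt width height
instance (width : Int) (height : Int) (out : List String) : Decidable (Spec_blank_py width height out) := by unfold Spec_blank_py; infer_instance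

-- ===== CLAIM (what is proved, stated in full; the proofs are below) =====
def Claim_equal_blank_py : Prop := ∀ (width : Int) (height : Int), Dom_blank_py width height → Spec_blank_py width height (blank_py width height)

-- ===== LEMMAS AND PROOFS =====

-- ===== VERDICT (by name: the statement is the Claim_ definition above) =====
theorem blank_py_spec : Claim_equal_blank_py := by
  intro width height _
  show blank_py width height = blank_py_alt width height
  simp [blank_py, blank_py_alt, List.map_const']
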